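-- pv_equiv track=rewrite | github.com/minmooo-ya/Baek | 백준/Gold/8983. 사냥꾼/사냥꾼.py | count_animals
-- ===== SOURCE A (Python) =====
-- import bisect
--
-- def count_animals(M, N, L, M_list, animals):
--     M_list.sort()
--
--     count = 0
--
--     for animal in animals:
--         animal_x, animal_y = animal
--         # 동물의 위치에서 가까운 사대를 찾기 위해 이진 탐색을 사용
--         # bisect_left: 동물의 x좌표가 들어갈 위치를 찾음
--         idx = bisect.bisect_left(M_list, animal_x)
--
--         # 두 개의 사대 후보를 확인
--         possible = False
--
--         # 사대 후보가 있을 경우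
--         if idx < M:
--             # 오른쪽 사대
--             fort_x = M_list[idx]
--             if abs(fort_x - animal_x) + animal_y <= L:
--                 possible = True
--
--         if not possible and idx > 0:
--             # 왼쪽 사대
--             fort_x = M_list[idx - 1]
--             if abs(fort_x - animal_x) + animal_y <= L:
--                 possible = True
--
--         # 가능한 경우
--         if possible:
--             count += 1
--
--     return count
-- ===== SOURCE B (Python) =====
-- def count_animals(M, N, L, M_list, animals):
--     # An animal is catchable iff some shooting post reaches it (|post - x| + y <= L).
--     # Note: the return value does not depend on the posts' order, so no sorting is needed.
--     count = 0
--     for x, y in animals: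
--         if any(abs(p - x) + y <= L for p in M_list):
--             count += 1
--     return count
-- ===== Notes on version B (the rewrite author's own statement) =====
-- stated objective: simpler
-- what changed: Replaces sort + binary search (bisect_left) + two-neighbour check by a direct per-animal existential scan: count the animal iff some post reaches it (|post - x| + y <= L); A additionally sorts M_list in place, B leaves it untouched (return-value equivalence).
-- intended difference: When M understates the number of posts (M <= number of posts strictly left of some animal, which needs M < len(M_list)) and that animal is reachable only from its right, A's 'idx < M' guard consults the stale parameter M instead of the actual list and returns an undercount; B counts every animal some actual post reaches, which is the intended value. — e.g. on count_animals(1, 0, 2, [0, 3], [(2, 1)]): A returns 0, B returns 1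
-- crash fix: When M exceeds len(M_list) and some animal lies strictly right of every post, A raises IndexError (M_list[idx] past the end); B returns the count obtained from the actual posts list. — e.g. on count_animals(1, 0, 0, [], [(0, 0)]): A raises IndexError, B returns 0
import Mathlib
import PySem

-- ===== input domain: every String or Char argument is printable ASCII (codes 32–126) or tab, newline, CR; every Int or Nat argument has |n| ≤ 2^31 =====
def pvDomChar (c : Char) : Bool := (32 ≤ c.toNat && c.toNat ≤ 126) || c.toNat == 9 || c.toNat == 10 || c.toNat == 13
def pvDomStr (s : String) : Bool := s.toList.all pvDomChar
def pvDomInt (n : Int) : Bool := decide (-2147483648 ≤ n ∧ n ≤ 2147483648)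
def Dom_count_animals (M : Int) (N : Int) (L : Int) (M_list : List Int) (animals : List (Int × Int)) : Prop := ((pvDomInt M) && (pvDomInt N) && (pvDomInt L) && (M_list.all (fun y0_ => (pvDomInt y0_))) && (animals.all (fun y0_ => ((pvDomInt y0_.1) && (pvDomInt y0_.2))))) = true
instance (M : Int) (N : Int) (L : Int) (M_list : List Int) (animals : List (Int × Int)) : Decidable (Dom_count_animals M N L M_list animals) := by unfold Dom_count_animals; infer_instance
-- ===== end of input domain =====

-- B counts an animal iff some post reaches it (|post - x| + y <= L), one direct existential scan per
-- animal, replacing A's sort + bisect + two-neighbour check (alternative decomposition, not faster).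
-- A sorts M_list in place, B does not; the equivalence proved here is about the return value only.

-- ===== PORT A =====
-- literal transliteration of A: sort, then per animal bisect_left and check the two neighbour posts
def count_animals (M : Int) (N : Int) (L : Int) (M_list : List Int) (animals : List (Int × Int)) : Int :=
  let s := PySem.List.sorted M_list (fun v => v) false    -- M_list.sort(); the loop reads the sorted list
  animals.foldl (fun count animal =>
    let animal_x := animal.1
    let animal_y := animal.2
    let idx := PySem.List.bisectLeft s animal_x           -- bisect.bisect_left(M_list, animal_x)
    let possible : Bool := false
    let possible :=
      if (idx : Int) < M then
        -- M_list[idx] raises IndexError when idx = len(M_list); exactly those inputs are excluded by Pre_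
        let fort_x := PySem.List.pyGetD s (idx : Int) 0
        if |fort_x - animal_x| + animal_y ≤ L then true else possible
      else possible
    let possible :=
      if possible = false ∧ 0 < (idx : Int) then
        let fort_x := PySem.List.pyGetD s ((idx : Int) - 1) 0
        if |fort_x - animal_x| + animal_y ≤ L then true else possible
      else possible
    if possible then count + 1 else count) 0

-- ===== PORT B =====
def count_animals_alt (M : Int) (N : Int) (L : Int) (M_list : List Int) (animals : List (Int × Int)) : Int :=
  animals.foldl (fun count a =>
    if M_list.any (fun p => decide (|p - a.1| + a.2 ≤ L)) then count + 1 else count) 0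

-- ===== PRECONDITION & SPEC =====
-- Pre_ excludes exactly the inputs on which A raises IndexError: M claims more posts than
-- M_list holds (idx < M) while some animal lies strictly right of every post (idx = len).
def Pre_count_animals (M : Int) (N : Int) (L : Int) (M_list : List Int) (animals : List (Int × Int)) : Prop :=
  ∀ a ∈ animals, (∀ p ∈ M_list, p < a.1) → M ≤ (M_list.length : Int)
instance (M : Int) (N : Int) (L : Int) (M_list : List Int) (animals : List (Int × Int)) : Decidable (Pre_count_animals M N L M_list animals) := by unfold Pre_count_animals; infer_instance

def pvWitness_count_animals : Int × Int × Int × List Int × (List (Int × Int)) := (1, 1, 5, [0], [(2, 1)])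

-- On inputs where M > len(M_list) and some animal lies strictly right of every post, A raises IndexError; B returns the count obtained from the actual posts list.
def Raises_count_animals (M : Int) (N : Int) (L : Int) (M_list : List Int) (animals : List (Int × Int)) : Prop :=
  (M_list.length : Int) < M ∧ ∃ a ∈ animals, ∀ p ∈ M_list, p < a.1
instance (M : Int) (N : Int) (L : Int) (M_list : List Int) (animals : List (Int × Int)) : Decidable (Raises_count_animals M N L M_list animals) := by unfold Raises_count_animals; infer_instance
def pvRaiseWitness_count_animals : Int × Int × Int × List Int × (List (Int × Int)) := (1, 0, 0, [], [(0, 0)])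
def pvRaiseWitnessOut_count_animals : Int := 0

-- When M understates the number of posts (M < len(M_list)), A's 'idx < M' guard consults the stale
-- parameter and can ignore a reachable post to the right of an animal, undercounting; B counts every
-- animal some actual post reaches, which is the intended value.
def D_count_animals (M : Int) (N : Int) (L : Int) (M_list : List Int) (animals : List (Int × Int)) : Prop :=
  ∃ a ∈ animals,
    M ≤ (M_list.countP (fun p => decide (p < a.1)) : Int) ∧
    (∃ p ∈ M_list, a.1 ≤ p ∧ p - a.1 + a.2 ≤ L) ∧
    ¬ (∃ p ∈ M_list, p < a.1 ∧ a.1 - p + a.2 ≤ L)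
instance (M : Int) (N : Int) (L : Int) (M_list : List Int) (animals : List (Int × Int)) : Decidable (D_count_animals M N L M_list animals) := by unfold D_count_animals; infer_instance

def Spec_count_animals (M : Int) (N : Int) (L : Int) (M_list : List Int) (animals : List (Int × Int)) (out : Int) : Prop := ¬ D_count_animals M N L M_list animals → out = count_animals_alt M N L M_list animals
instance (M : Int) (N : Int) (L : Int) (M_list : List Int) (animals : List (Int × Int)) (out : Int) : Decidable (Spec_count_animals M N L M_list animals out) := by unfold Spec_count_animals; infer_instance

def pvDiffWitness_count_animals : Int × Int × Int × List Int × (List (Int × Int)) := (1, 0, 2, [0, 3], [(2, 1)])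
def pvDiffWitnessOut_count_animals : Int × Int := (0, 1)

-- ===== CLAIM (what is proved, stated in full; the proofs are below) =====
def Claim_unchanged_count_animals : Prop := ∀ (M : Int) (N : Int) (L : Int) (M_list : List Int) (animals : List (Int × Int)), Dom_count_animals M N L M_list animals → Pre_count_animals M N L M_list animals → Spec_count_animals M N L M_list animals (count_animals M N L M_list animals)
def Claim_changed_count_animals : Prop := Dom_count_animals (pvDiffWitness_count_animals.1) (pvDiffWitness_count_animals.2.1) (pvDiffWitness_count_animals.2.2.1) (pvDiffWitness_count_animals.2.2.2.1) (pvDiffWitness_count_animals.2.2.2.2) ∧ Pre_count_animals (pvDiffWitness_count_animals.1) (pvDiffWitness_count_animals.2.1) (pvDiffWitness_count_animals.2.2.1) (pvDiffWitness_count_animals.2.2.2.1) (pvDiffWitness_count_animals.2.2.2.2) ∧ D_count_animals (pvDiffWitness_count_animals.1) (pvDiffWitness_count_animals.2.1) (pvDiffWitness_count_animals.2.2.1) (pvDiffWitness_count_animals.2.2.2.1) (pvDiffWitness_count_animals.2.2.2.2) ∧ count_animals (pvDiffWitness_count_animals.1) (pvDiffWitness_count_animals.2.1) (pvDiffWitness_count_animals.2.2.1)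 (pvDiffWitness_count_animals.2.2.2.1) (pvDiffWitness_count_animals.2.2.2.2) = pvDiffWitnessOut_count_animals.1 ∧ count_animals_alt (pvDiffWitness_count_animals.1) (pvDiffWitness_count_animals.2.1) (pvDiffWitness_count_animals.2.2.1) (pvDiffWitness_count_animals.2.2.2.1) (pvDiffWitness_count_animals.2.2.2.2) = pvDiffWitnessOut_count_animals.2 ∧ pvDiffWitnessOut_count_animals.1 ≠ pvDiffWitnessOut_count_animals.2
def Claim_exact_count_animals : Prop := ∀ (M : Int) (N : Int) (L : Int) (M_list : List Int) (animals : List (Int × Int)), Dom_count_animals M N L M_list animals → Pre_count_animals M N L M_list animals → D_count_animals M N L M_list animals → count_animals M N L M_list animals ≠ count_animals_alt M N L M_list animals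
def Claim_raises_count_animals : Prop := (∀ (M : Int) (N : Int) (L : Int) (M_list : List Int) (animals : List (Int × Int)), Dom_count_animals M N L M_list animals → Raises_count_animals M N L M_list animals → ¬ Pre_count_animals M N L M_list animals) ∧ (Dom_count_animals (pvRaiseWitness_count_animals.1) (pvRaiseWitness_count_animals.2.1) (pvRaiseWitness_count_animals.2.2.1) (pvRaiseWitness_count_animals.2.2.2.1) (pvRaiseWitness_count_animals.2.2.2.2) ∧ Raises_count_animals (pvRaiseWitness_count_animals.1) (pvRaiseWitness_count_animals.2.1) (pvRaiseWitness_count_animals.2.2.1) (pvRaiseWitness_count_animals.2.2.2.1) (pvRaiseWitness_count_animals.2.2.2.2) ∧ count_animals_alt (pvRaiseWitness_count_animals.1) (pvRaiseWitness_count_animals.2.1) (pvRaiseWitness_count_animals.2.2.1) (pvRaiseWitness_count_animals.2.2.2.1) (pvRaiseWitness_count_animals.2.2.2.2) = pvRaiseWitnessOut_count_animals)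

-- ===== LEMMAS AND PROOFS =====

-- A's per-animal test (the final value of 'possible'), factored out of the fold
def pA (M : Int) (L : Int) (s : List Int) (animal : Int × Int) : Bool :=
  let animal_x := animal.1
  let animal_y := animal.2
  let idx := PySem.List.bisectLeft s animal_x
  let possible : Bool := false
  let possible :=
    if (idx : Int) < M then
      let fort_x := PySem.List.pyGetD s (idx : Int) 0
      if |fort_x - animal_x| + animal_y ≤ L then true else possible
    else possible
  let possible :=
    if possible = false ∧ 0 < (idx : Int) then
      let fort_x := PySem.List.pyGetD s ((idx : Int) - 1) 0
      if |fort_x - animal_x| + animal_y ≤ L then true else possible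
    else possible
  possible

-- B's per-animal test
def pB (L : Int) (M_list : List Int) (a : Int × Int) : Bool :=
  M_list.any (fun p => decide (|p - a.1| + a.2 ≤ L))

lemma countA_eq (M N L : Int) (ml : List Int) (an : List (Int × Int)) :
    count_animals M N L ml an =
      ((an.countP (pA M L (PySem.List.sorted ml (fun v => v) false))) : Int) := by
  show an.foldl
      (fun count animal =>
        if pA M L (PySem.List.sorted ml (fun v => v) false) animal then count + 1 else count) 0 = _
  rw [PySem.List.foldl_if_add_one]
  simp

lemma countB_eq (M N L : Int) (ml : List Int) (an : List (Int × Int)) :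
    count_animals_alt M N L ml an = ((an.countP (pB L ml)) : Int) := by
  show an.foldl (fun count a => if pB L ml a then count + 1 else count) 0 = _
  rw [PySem.List.foldl_if_add_one]
  simp

lemma pB_iff (L : Int) (ml : List Int) (a : Int × Int) :
    pB L ml a = true ↔
      ((∃ p ∈ ml, a.1 ≤ p ∧ p - a.1 + a.2 ≤ L) ∨ (∃ p ∈ ml, p < a.1 ∧ a.1 - p + a.2 ≤ L)) := by
  simp only [pB, List.any_eq_true, decide_eq_true_eq]
  constructor
  · rintro ⟨p, hp, habs⟩
    by_cases h : p < a.1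
    · right; exact ⟨p, hp, h, by rw [abs_of_neg (by omega)] at habs; omega⟩
    · left; exact ⟨p, hp, by omega, by rw [abs_of_nonneg (by omega)] at habs; omega⟩
  · rintro (⟨p, hp, h1, h2⟩ | ⟨p, hp, h1, h2⟩)
    · exact ⟨p, hp, by rw [abs_of_nonneg (by omega)]; omega⟩
    · exact ⟨p, hp, by rw [abs_of_neg (by omega)]; omega⟩

-- bisect_left position = number of posts strictly left of x
lemma countP_eq_bisect (ml : List Int) (x : Int) :
    ml.countP (fun p => decide (p < x)) =
      PySem.List.bisectLeft (PySem.List.sorted ml (fun v => v) false) x := by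
  set s := PySem.List.sorted ml (fun v => v) false with hs
  have hperm : s.Perm ml := PySem.List.sorted_perm ml (fun v => v) false
  obtain ⟨hk, hlt, hge⟩ := PySem.List.bisectLeft_spec s x (PySem.List.sorted_pairwise ml (fun v => v))
  rw [← hperm.countP_eq]
  set k := PySem.List.bisectLeft s x with hkdef
  conv_lhs => rw [← List.take_append_drop k s]
  rw [List.countP_append]
  have h1 : (s.take k).countP (fun p => decide (p < x)) = (s.take k).length := by
    apply List.countP_eq_length.mpr
    intro p hp
    obtain ⟨j, hj, rfl⟩ := List.mem_iff_getElem.mp hp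
    have hj' : j < k ∧ j < s.length := by rw [List.length_take] at hj; omega
    rw [List.getElem_take]
    simpa using hlt j hj'.2 hj'.1
  have h2 : (s.drop k).countP (fun p => decide (p < x)) = 0 := by
    apply List.countP_eq_zero.mpr
    intro p hp
    obtain ⟨j, hj, rfl⟩ := List.mem_iff_getElem.mp hp
    rw [List.getElem_drop]
    have hj' : k + j < s.length := by rw [List.length_drop] at hj; omega
    have := hge _ hj' (Nat.le_add_right _ _)
    simpa using by omega
  rw [h1, h2, List.length_take]
  omega

-- a reachable post at or right of x exists iff the bisect neighbour s[idx] is reachable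
lemma exR_iff (L : Int) (ml : List Int) (x y : Int) :
    (∃ p ∈ ml, x ≤ p ∧ p - x + y ≤ L) ↔
      (PySem.List.bisectLeft (PySem.List.sorted ml (fun v => v) false) x <
          (PySem.List.sorted ml (fun v => v) false).length ∧
        (PySem.List.sorted ml (fun v => v) false).getD
            (PySem.List.bisectLeft (PySem.List.sorted ml (fun v => v) false) x) 0 - x + y ≤ L) := by
  set s := PySem.List.sorted ml (fun v => v) false with hs
  have hmem : ∀ p, p ∈ s ↔ p ∈ ml := fun p => PySem.List.mem_sorted ml (fun v => v) false p
  obtain ⟨hk, hlt, hge⟩ := PySem.List.bisectLeft_spec s x (PySem.List.sorted_pairwise ml (fun v => v))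
  set k := PySem.List.bisectLeft s x with hkdef
  constructor
  · rintro ⟨p, hp, hxp, hL⟩
    obtain ⟨j, hj, rfl⟩ := List.mem_iff_getElem.mp ((hmem p).mpr hp)
    have hjk : k ≤ j := by
      by_contra h
      have := hlt j hj (by omega)
      omega
    have hkl : k < s.length := by omega
    have hmono : s[k] ≤ s[j] :=
      PySem.List.sorted_id_getElem_mono ml hjk hj
    refine ⟨hkl, ?_⟩
    rw [List.getD_eq_getElem s 0 hkl]
    omega
  · rintro ⟨h, hL⟩
    rw [List.getD_eq_getElem s 0 h] at hL
    exact ⟨s[k], (hmem _).mp (List.getElem_mem h), hge k h le_rfl, hL⟩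

-- a reachable post strictly left of x exists iff the bisect neighbour s[idx-1] is reachable
lemma exL_iff (L : Int) (ml : List Int) (x y : Int) :
    (∃ p ∈ ml, p < x ∧ x - p + y ≤ L) ↔
      (0 < PySem.List.bisectLeft (PySem.List.sorted ml (fun v => v) false) x ∧
        x - (PySem.List.sorted ml (fun v => v) false).getD
            (PySem.List.bisectLeft (PySem.List.sorted ml (fun v => v) false) x - 1) 0 + y ≤ L) := by
  set s := PySem.List.sorted ml (fun v => v) false with hs
  have hmem : ∀ p, p ∈ s ↔ p ∈ ml := fun p => PySem.List.mem_sorted ml (fun v => v) false p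
  obtain ⟨hk, hlt, hge⟩ := PySem.List.bisectLeft_spec s x (PySem.List.sorted_pairwise ml (fun v => v))
  set k := PySem.List.bisectLeft s x with hkdef
  constructor
  · rintro ⟨p, hp, hpx, hL⟩
    obtain ⟨j, hj, rfl⟩ := List.mem_iff_getElem.mp ((hmem p).mpr hp)
    have hjk : j < k := by
      by_contra h
      have := hge j hj (by omega)
      omega
    have hk1 : k - 1 < s.length := by omega
    have hmono : s[j] ≤ s[k - 1] :=
      PySem.List.sorted_id_getElem_mono ml (by omega) (by omega)
    refine ⟨by omega, ?_⟩
    rw [List.getD_eq_getElem s 0 hk1]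
    omega
  · rintro ⟨h, hL⟩
    have hk1 : k - 1 < s.length := by omega
    rw [List.getD_eq_getElem s 0 hk1] at hL
    exact ⟨s[k - 1], (hmem _).mp (List.getElem_mem hk1), hlt (k - 1) hk1 (by omega), hL⟩

-- the characterisation of A's per-animal test, under the no-raise precondition for that animal
lemma pA_iff (M L : Int) (ml : List Int) (a : Int × Int)
    (hpre : (∀ p ∈ ml, p < a.1) → M ≤ (ml.length : Int)) :
    pA M L (PySem.List.sorted ml (fun v => v) false) a = true ↔
      (((ml.countP (fun p => decide (p < a.1)) : Int) < M ∧
          ∃ p ∈ ml, a.1 ≤ p ∧ p - a.1 + a.2 ≤ L) ∨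
        (∃ p ∈ ml, p < a.1 ∧ a.1 - p + a.2 ≤ L)) := by
  set s := PySem.List.sorted ml (fun v => v) false with hs
  obtain ⟨hk, hlt, hge⟩ := PySem.List.bisectLeft_spec s a.1 (PySem.List.sorted_pairwise ml (fun v => v))
  set k := PySem.List.bisectLeft s a.1 with hkdef
  have hcnt : ml.countP (fun p => decide (p < a.1)) = k := by
    rw [hkdef, hs]; exact countP_eq_bisect ml a.1
  -- under Pre for this animal, idx < M forces idx < len
  have hklen : (k : Int) < M → k < s.length := by
    intro hkM
    by_contra h
    have hke : s.length ≤ k := by omega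
    have hall : ∀ p ∈ ml, p < a.1 := by
      intro p hp
      obtain ⟨j, hj, rfl⟩ := List.mem_iff_getElem.mp
        ((PySem.List.mem_sorted ml (fun v => v) false p).mpr hp)
      exact hlt j hj (Nat.lt_of_lt_of_le hj hke)
    have hll : s.length = ml.length := PySem.List.length_sorted ml (fun v => v) false
    have := hpre hall
    omega
  rw [hcnt, exR_iff L ml a.1 a.2, exL_iff L ml a.1 a.2, ← hs, ← hkdef]
  unfold pA
  simp only [← hkdef]
  by_cases hM : (k : Int) < M
  · have hkl : k < s.length := hklen hM
    have hsome : s[k]? = some s[k] := List.getElem?_eq_getElem hkl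
    have hget : PySem.List.pyGetD s (k : Int) 0 = s[k] := by
      rw [PySem.List.pyGetD_natCast]; exact List.getD_eq_getElem s 0 hkl
    have habs : |s[k] - a.1| = s[k] - a.1 :=
      abs_of_nonneg (by have := hge k hkl le_rfl; omega)
    by_cases hR : s[k] - a.1 + a.2 ≤ L
    · simp [hM, hget, habs, hR, hkl]
    · by_cases hk0 : 0 < (k : Int)
      · have hk1 : k - 1 < s.length := by omega
        have hsome1 : s[k - 1]? = some s[k - 1] := List.getElem?_eq_getElem hk1
        have hget1 : PySem.List.pyGetD s ((k : Int) - 1) 0 = s[k - 1] := by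
          rw [(by omega : ((k : Int) - 1) = ((k - 1 : Nat) : Int)), PySem.List.pyGetD_natCast]
          exact List.getD_eq_getElem s 0 hk1
        have habs1 : |s[k - 1] - a.1| = a.1 - s[k - 1] := by
          rw [abs_of_nonpos (by have := hlt (k - 1) hk1 (by omega); omega)]; ring
        have hk0' : 0 < k := by omega
        by_cases hLft : a.1 - s[k - 1] + a.2 ≤ L
        · simp [hM, hget, habs, hR, hget1, hsome1, habs1, hLft, hkl, hk0']
        · simp [hM, hget, habs, hR, hget1, hsome1, habs1, hLft, hkl, hk0']
      · have hk0' : ¬ 0 < k := by omega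
        simp [hM, hget, habs, hR, hk0', hkl]
  · by_cases hk0 : 0 < (k : Int)
    · have hk1 : k - 1 < s.length := by omega
      have hsome1 : s[k - 1]? = some s[k - 1] := List.getElem?_eq_getElem hk1
      have hget1 : PySem.List.pyGetD s ((k : Int) - 1) 0 = s[k - 1] := by
        rw [(by omega : ((k : Int) - 1) = ((k - 1 : Nat) : Int)), PySem.List.pyGetD_natCast]
        exact List.getD_eq_getElem s 0 hk1
      have habs1 : |s[k - 1] - a.1| = a.1 - s[k - 1] := by
        rw [abs_of_nonpos (by have := hlt (k - 1) hk1 (by omega); omega)]; ring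
      have hk0' : 0 < k := by omega
      by_cases hLft : a.1 - s[k - 1] + a.2 ≤ L
      · simp [hM, hget1, hsome1, habs1, hLft, hk0']
      · simp [hM, hget1, hsome1, habs1, hLft, hk0']
    · have hk0' : ¬ 0 < k := by omega
      simp [hM, hk0']

-- strict count comparison: f implies g on the list and fails strictly at one member
lemma countP_lt_of_mem {α : Type} (f g : α → Bool) (l : List α)
    (h : ∀ a ∈ l, f a = true → g a = true) (a0 : α) (ha0 : a0 ∈ l)
    (hg : g a0 = true) (hf : f a0 = false) : l.countP f < l.countP g := by
  induction l with
  | nil => cases ha0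
  | cons b t ih =>
    have hmono : t.countP f ≤ t.countP g :=
      List.countP_mono_left (fun a ha => h a (List.mem_cons_of_mem b ha))
    rcases List.mem_cons.mp ha0 with rfl | hmem
    · rw [List.countP_cons, List.countP_cons, hg, hf]
      simpa using by omega
    · have := ih (fun a ha hfa => h a (List.mem_cons_of_mem b ha) hfa) hmem
      rw [List.countP_cons, List.countP_cons]
      have hbf : (if f b then 1 else 0) ≤ (if g b then 1 else 0) := by
        by_cases hb : f b = true
        · simp [hb, h b (by simp) hb]
        · simp [Bool.eq_false_iff.mpr hb]
      omega

-- ===== VERDICT (by name: the statement is the Claim_ definition above) =====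
theorem count_animals_spec : Claim_unchanged_count_animals := by
  intro M N L ml an _ hpre hnd
  show count_animals M N L ml an = count_animals_alt M N L ml an
  rw [countA_eq, countB_eq]
  congr 1
  apply List.countP_congr
  intro a ha
  rw [pA_iff M L ml a (hpre a ha), pB_iff L ml a]
  have hda : ¬ (M ≤ (ml.countP (fun p => decide (p < a.1)) : Int) ∧
      (∃ p ∈ ml, a.1 ≤ p ∧ p - a.1 + a.2 ≤ L) ∧
      ¬ (∃ p ∈ ml, p < a.1 ∧ a.1 - p + a.2 ≤ L)) := by
    intro hd
    exact hnd ⟨a, ha, hd⟩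
  constructor
  · rintro (⟨_, h⟩ | h)
    · exact Or.inl h
    · exact Or.inr h
  · rintro (h | h)
    · by_cases hL : ∃ p ∈ ml, p < a.1 ∧ a.1 - p + a.2 ≤ L
      · exact Or.inr hL
      · have hc : (ml.countP (fun p => decide (p < a.1)) : Int) < M := by
          by_contra hcc
          exact hda ⟨by omega, h, hL⟩
        exact Or.inl ⟨hc, h⟩
    · exact Or.inr h

theorem count_animals_changed : Claim_changed_count_animals := by
  unfold Claim_changed_count_animals; decide

theorem count_animals_tight : Claim_exact_count_animals := by
  intro M N L ml an _ hpre hd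
  obtain ⟨a0, ha0, hcnt, hR, hL⟩ := hd
  rw [countA_eq, countB_eq]
  have hlt : an.countP (pA M L (PySem.List.sorted ml (fun v => v) false)) < an.countP (pB L ml) := by
    apply countP_lt_of_mem _ _ an ?_ a0 ha0
    · rw [pB_iff]; exact Or.inl hR
    · rw [Bool.eq_false_iff, ne_eq, pA_iff M L ml a0 (hpre a0 ha0)]
      rintro (⟨h1, _⟩ | h2)
      · omega
      · exact hL h2
    · intro a ha hfa
      rw [pA_iff M L ml a (hpre a ha)] at hfa
      rw [pB_iff]
      rcases hfa with ⟨_, h⟩ | h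
      · exact Or.inl h
      · exact Or.inr h
  intro h
  rw [Nat.cast_inj] at h
  omega

theorem count_animals_raises : Claim_raises_count_animals := by
  unfold Claim_raises_count_animals
  refine ⟨?_, by decide⟩
  intro M N L M_list animals _ hr hpre
  obtain ⟨hlen, a, ha, hall⟩ := hr
  exact absurd (hpre a ha hall) (by omega)

-- self-check: the concrete half of the crash-fix claim, projected out of count_animals_raises
theorem pvRaiseWitness_ok :
    Raises_count_animals (pvRaiseWitness_count_animals.1) (pvRaiseWitness_count_animals.2.1) (pvRaiseWitness_count_animals.2.2.1) (pvRaiseWitness_count_animals.2.2.2.1) (pvRaiseWitness_count_animals.2.2.2.2) ∧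
    count_animals_alt (pvRaiseWitness_count_animals.1) (pvRaiseWitness_count_animals.2.1) (pvRaiseWitness_count_animals.2.2.1) (pvRaiseWitness_count_animals.2.2.2.1) (pvRaiseWitness_count_animals.2.2.2.2) = pvRaiseWitnessOut_count_animals :=
  ⟨count_animals_raises.2.2.1, count_animals_raises.2.2.2⟩
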